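-- pv_equiv track=rewrite | github.com/Nilesh080/SPCC-PRACS-NILESH | SPCCPracs-main/Old/Macro.py | generate_mnt_mdt
-- ===== SOURCE A (Python) =====
-- def generate_mnt_mdt(alp):
--     mnt = {}
--     mdt = {}
--     ala = {}
--     macro_name = None
--     parameters = []
--     inside_macro = False
--     for line in alp.split('\n'):
--         if line.startswith('MACRO'):
--             parts = line.split()
--             macro_name = parts[1]
--             parameters = parts[2:]
--             ala[macro_name] = parameters
--             mnt[macro_name] = len(parameters)
--             mdt[macro_name] = []
--             inside_macro = True
--         elif line.startswith('MEND'):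
--             inside_macro = False
--         elif inside_macro:
--             mdt[macro_name].append(line)
--     for macro_name in mdt:
--         mdt[macro_name].append("MEND")
--     return mnt, mdt, ala
-- ===== SOURCE B (Python) =====
-- def generate_mnt_mdt(alp):
--     # Block-at-a-time parse: find each MACRO header, then collect its body up to
--     # MEND / the next MACRO header, storing the finished body (plus "MEND") at once.
--     mnt, mdt, ala = {}, {}, {}
--     lines = alp.split('\n')
--     i, n = 0, len(lines)
--     while i < n:
--         line = lines[i]
--         i += 1
--         if not line.startswith('MACRO'):
--             continue
--         parts = line.split()
--         name = parts[1]
--         params = parts[2:]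
--         body = []
--         while i < n and not lines[i].startswith('MEND') and not lines[i].startswith('MACRO'):
--             body.append(lines[i])
--             i += 1
--         if i < n and lines[i].startswith('MEND'):
--             i += 1
--         ala[name] = params
--         mnt[name] = len(params)
--         mdt[name] = body + ['MEND']
--     return mnt, mdt, ala
-- ===== Notes on version B (the rewrite author's own statement) =====
-- stated objective: alternative
-- what changed: Replaces A's flag-driven single loop plus a separate append-'MEND' post-pass over the whole mdt dict by a block-at-a-time parse that finds each MACRO header, collects that macro's body up to MEND or the next header, and stores the finished body (with 'MEND' appended) in one step.
import Mathlib
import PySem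

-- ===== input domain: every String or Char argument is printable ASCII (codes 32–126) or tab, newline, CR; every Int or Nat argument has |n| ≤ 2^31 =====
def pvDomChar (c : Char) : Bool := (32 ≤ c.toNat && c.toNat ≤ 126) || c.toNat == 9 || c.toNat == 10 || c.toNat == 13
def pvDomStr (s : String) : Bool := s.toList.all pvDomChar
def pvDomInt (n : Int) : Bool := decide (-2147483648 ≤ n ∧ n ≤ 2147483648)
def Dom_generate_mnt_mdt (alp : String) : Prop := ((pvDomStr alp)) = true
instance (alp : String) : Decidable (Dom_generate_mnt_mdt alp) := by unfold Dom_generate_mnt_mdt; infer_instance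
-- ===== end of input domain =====

-- B replaces A's flag-driven single loop plus its separate append-"MEND" post-pass by a
-- block-at-a-time parse (find a header, collect that macro's body, store it finished at
-- once); same result, different decomposition (objective: alternative).

-- ===== PORT A =====
-- A's loop state: (mnt, mdt, ala, macro_name, inside_macro).  The Python variable
-- 'parameters' is only read inside the same MACRO branch that assigns it, so it is a
-- local here.  'mname.getD ""' transliterates mdt[macro_name]: macro_name is always a
-- set name when inside_macro holds, so the default is never read.
def pvStepA
    (st : PySem.Dict String Int × PySem.Dict String (List String) ×
          PySem.Dict String (List String) × Option String × Bool)
    (line : String) :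
    PySem.Dict String Int × PySem.Dict String (List String) ×
    PySem.Dict String (List String) × Option String × Bool :=
  let (mnt, mdt, ala, mname, inside) := st
  if PySem.Str.startswith line "MACRO" then
    let parts := PySem.Str.split₀ line
    let name := PySem.List.pyGetD parts 1 ""        -- parts[1]; IndexError excluded by Pre_
    let params := PySem.List.slice parts (some 2) none
    (mnt.insert name (params.length : Int), mdt.insert name [], ala.insert name params,
     some name, true)
  else if PySem.Str.startswith line "MEND" then
    (mnt, mdt, ala, mname, false)
  else if inside then
    (mnt, mdt.modify (mname.getD "") [] (· ++ [line]), ala, mname, true)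
  else
    st

def generate_mnt_mdt (alp : String) :
    (List (String × Int)) × (List (String × List String)) × (List (String × List String)) :=
  let lines := (PySem.Str.split? alp "\n").getD []   -- alp.split('\n'); exact: sep ≠ ""
  let st := lines.foldl pvStepA (PySem.Dict.empty, PySem.Dict.empty, PySem.Dict.empty, none, false)
  let mnt := st.1
  let mdt := st.2.1
  let ala := st.2.2.1
  -- for macro_name in mdt: mdt[macro_name].append("MEND")
  let mdt2 := mdt.keys.foldl (fun d k => d.modify k [] (· ++ ["MEND"])) mdt
  (mnt.items, mdt2.items, ala.items)

-- ===== PORT B =====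
-- collect the body of one macro: lines up to (and consuming) a MEND line, or up to
-- (not consuming) the next MACRO header; returns (body, remaining lines)
def pvCollectBody : List String → List String × List String
  | [] => ([], [])
  | l :: ls =>
    if PySem.Str.startswith l "MEND" then ([], ls)
    else if PySem.Str.startswith l "MACRO" then ([], l :: ls)
    else
      let br := pvCollectBody ls
      (l :: br.1, br.2)

-- termination measure for pvParseB (cited by its decreasing_by)
theorem pvCollectBody_rest_le (ls : List String) : (pvCollectBody ls).2.length ≤ ls.length := by
  induction ls with
  | nil => simp [pvCollectBody]
  | cons l ls ih =>
    simp only [pvCollectBody]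
    split_ifs <;> simp
    omega

def pvParseB :
    List String →
    PySem.Dict String Int × PySem.Dict String (List String) × PySem.Dict String (List String) →
    PySem.Dict String Int × PySem.Dict String (List String) × PySem.Dict String (List String)
  | [], st => st
  | l :: ls, (mnt, mdt, ala) =>
    if PySem.Str.startswith l "MACRO" then
      let parts := PySem.Str.split₀ l
      let name := PySem.List.pyGetD parts 1 ""      -- parts[1]; IndexError excluded by Pre_
      let params := PySem.List.slice parts (some 2) none
      pvParseB (pvCollectBody ls).2
        (mnt.insert name (params.length : Int),
         mdt.insert name ((pvCollectBody ls).1 ++ ["MEND"]),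
         ala.insert name params)
    else
      pvParseB ls (mnt, mdt, ala)
  termination_by ls _ => ls.length
  decreasing_by
  · have := pvCollectBody_rest_le ls; simp; omega
  · simp

def generate_mnt_mdt_alt (alp : String) :
    (List (String × Int)) × (List (String × List String)) × (List (String × List String)) :=
  let lines := (PySem.Str.split? alp "\n").getD []   -- alp.split('\n'); exact: sep ≠ ""
  let r := pvParseB lines (PySem.Dict.empty, PySem.Dict.empty, PySem.Dict.empty)
  (r.1.items, r.2.1.items, r.2.2.items)

-- ===== PRECONDITION & SPEC =====
-- Pre_ excludes inputs having a line that starts with 'MACRO' but whitespace-splits into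
-- fewer than two tokens: there A raises IndexError on parts[1] (and so does B).
def Pre_generate_mnt_mdt (alp : String) : Prop :=
  ∀ line ∈ (PySem.Str.split? alp "\n").getD [],
    PySem.Str.startswith line "MACRO" = true → 2 ≤ (PySem.Str.split₀ line).length
instance (alp : String) : Decidable (Pre_generate_mnt_mdt alp) := by
  unfold Pre_generate_mnt_mdt; infer_instance

def pvWitness_generate_mnt_mdt : String := "MACRO M1 &X\nMOV A\nMEND"

def Spec_generate_mnt_mdt (alp : String)
    (out : (List (String × Int)) × (List (String × List String)) × (List (String × List String))) :
    Prop := out = generate_mnt_mdt_alt alp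
instance (alp : String)
    (out : (List (String × Int)) × (List (String × List String)) × (List (String × List String))) :
    Decidable (Spec_generate_mnt_mdt alp out) := by unfold Spec_generate_mnt_mdt; infer_instance

-- ===== CLAIM (what is proved, stated in full; the proofs are below) =====
def Claim_equal_generate_mnt_mdt : Prop :=
  ∀ (alp : String), Dom_generate_mnt_mdt alp → Pre_generate_mnt_mdt alp →
    Spec_generate_mnt_mdt alp (generate_mnt_mdt alp)

-- ===== LEMMAS AND PROOFS =====

-- append "MEND" to every stored body (what A's post-pass does to the whole dict)
def pvMend (d : PySem.Dict String (List String)) : PySem.Dict String (List String) :=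
  PySem.Dict.mk (d.items.map (fun p => (p.1, p.2 ++ ["MEND"])))

-- the three dictionaries of A's 5-tuple loop state
def pvProj
    (st : PySem.Dict String Int × PySem.Dict String (List String) ×
          PySem.Dict String (List String) × Option String × Bool) :
    PySem.Dict String Int × PySem.Dict String (List String) × PySem.Dict String (List String) :=
  (st.1, st.2.1, st.2.2.1)

-- view of A's loop state as B's triple, with A's post-pass applied to mdt
def pvPost
    (st : PySem.Dict String Int × PySem.Dict String (List String) ×
          PySem.Dict String (List String) × Option String × Bool) :
    PySem.Dict String Int × PySem.Dict String (List String) × PySem.Dict String (List String) :=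
  (st.1, pvMend st.2.1, st.2.2.1)

theorem pvMend_insert (d : PySem.Dict String (List String)) (k : String) (v : List String) :
    pvMend (d.insert k v) = (pvMend d).insert k (v ++ ["MEND"]) := by
  have hc : (pvMend d).contains k = d.contains k := by
    simp only [pvMend, PySem.Dict.contains]
    rw [List.any_map]; rfl
  apply PySem.Dict.ext
  simp only [PySem.Dict.insert, hc]
  by_cases h : d.contains k = true
  · simp only [h, if_pos, pvMend, List.map_map]
    apply List.map_congr_left
    intro p _
    by_cases hp : p.1 = k <;> simp [hp]
  · simp only [h, if_neg, Bool.false_eq_true, not_false_iff, pvMend]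
    simp

theorem pvAppendAll (body : List String) (d : PySem.Dict String (List String))
    (k : String) (v : List String) :
    body.foldl (fun d l => d.modify k [] (· ++ [l])) (d.insert k v) = d.insert k (v ++ body) := by
  induction body generalizing v with
  | nil => simp
  | cons l b ih =>
    have h1 : (d.insert k v).modify k [] (· ++ [l]) = d.insert k (v ++ [l]) := by
      show (d.insert k v).insert k ((d.insert k v).getD k [] ++ [l]) = _
      rw [PySem.Dict.getD_insert_self, PySem.Dict.insert_insert_self]
    simp only [List.foldl_cons, h1, ih]
    simp

theorem pvFinalizeAux (ps pre : List (String × List String))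
    (h : ((pre ++ ps).map Prod.fst).Nodup) :
    (ps.map Prod.fst).foldl (fun d k => PySem.Dict.modify d k [] (· ++ ["MEND"]))
      (PySem.Dict.mk (pre.map (fun p => (p.1, p.2 ++ ["MEND"])) ++ ps)) =
    PySem.Dict.mk ((pre ++ ps).map (fun p => (p.1, p.2 ++ ["MEND"]))) := by
  induction ps generalizing pre with
  | nil => simp
  | cons q ps ih =>
    obtain ⟨k, v⟩ := q
    have hsplit := List.nodup_append.mp (by simpa only [List.map_append] using h)
    have hpre : ∀ p ∈ pre, p.1 ≠ k := by
      intro p hp hk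
      exact hsplit.2.2 p.1 (List.mem_map.mpr ⟨p, hp, rfl⟩) k (by simp) hk
    have hps : ∀ p ∈ ps, p.1 ≠ k := by
      intro p hp hk
      exact (List.nodup_cons.mp (by simpa using hsplit.2.1)).1 (List.mem_map.mpr ⟨p, hp, hk⟩)
    have hstep :
        PySem.Dict.modify (PySem.Dict.mk (pre.map (fun p => (p.1, p.2 ++ ["MEND"])) ++ (k, v) :: ps)) k [] (· ++ ["MEND"])
          = PySem.Dict.mk ((pre ++ [(k, v)]).map (fun p => (p.1, p.2 ++ ["MEND"])) ++ ps) := by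
      have hgd : (PySem.Dict.mk (pre.map (fun p => (p.1, p.2 ++ ["MEND"])) ++ (k, v) :: ps)).getD k [] = v := by
        simp only [PySem.Dict.getD, PySem.Dict.get?, List.find?_append]
        rw [List.find?_eq_none.mpr]
        · simp
        · intro p hp
          obtain ⟨q, hq, rfl⟩ := List.mem_map.mp hp
          simp [hpre q hq]
      have hcon : (PySem.Dict.mk (pre.map (fun p => (p.1, p.2 ++ ["MEND"])) ++ (k, v) :: ps)).contains k = true := by
        simp [PySem.Dict.contains]
      show PySem.Dict.insert _ k _ = _
      rw [hgd]
      simp only [PySem.Dict.insert, hcon, if_pos]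
      apply PySem.Dict.ext
      show List.map _ _ = _
      rw [List.map_append, List.map_cons, List.map_append, List.map_cons, List.map_nil]
      have e1 : List.map (fun p => if (p.1 == k) = true then (k, v ++ ["MEND"]) else p)
          (pre.map (fun p => (p.1, p.2 ++ ["MEND"]))) = pre.map (fun p => (p.1, p.2 ++ ["MEND"])) := by
        apply (List.map_congr_left _).trans (List.map_id _)
        intro p hp
        obtain ⟨q, hq, rfl⟩ := List.mem_map.mp hp
        simp [hpre q hq]
      have e2 : List.map (fun p => if (p.1 == k) = true then (k, v ++ ["MEND"]) else p) ps = ps := by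
        apply (List.map_congr_left _).trans (List.map_id _)
        intro p hp
        simp [hps p hp]
      rw [e1, e2]
      simp
    simp only [List.map_cons, List.foldl_cons, hstep]
    rw [ih (pre ++ [(k, v)]) (by simpa using h)]
    simp

-- A's post-pass over the final dict's keys is exactly pvMend (keys are distinct)
theorem pvFinalize (d : PySem.Dict String (List String)) (h : d.keys.Nodup) :
    d.keys.foldl (fun d k => d.modify k [] (· ++ ["MEND"])) d = pvMend d := by
  have := pvFinalizeAux d.items [] (by simpa [PySem.Dict.keys] using h)
  simpa [PySem.Dict.keys, pvMend] using this

theorem pvFoldA_nodup (lines : List String)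
    (st : PySem.Dict String Int × PySem.Dict String (List String) ×
          PySem.Dict String (List String) × Option String × Bool)
    (h : st.2.1.keys.Nodup) : (lines.foldl pvStepA st).2.1.keys.Nodup := by
  induction lines generalizing st with
  | nil => exact h
  | cons l ls ih =>
    refine ih _ ?_
    obtain ⟨mnt, mdt, ala, mname, inside⟩ := st
    simp only [pvStepA]
    split_ifs <;> first
      | exact PySem.Dict.nodup_keys_insert _ _ _ h
      | exact h

-- a line cannot start with both "MACRO" and "MEND" (they differ at index 1)
theorem pvNotBoth (l : String) (h : PySem.Str.startswith l "MACRO" = true) :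
    PySem.Str.startswith l "MEND" = false := by
  by_contra hc
  rw [Bool.not_eq_false] at hc
  rw [PySem.Str.startswith_eq, PySem.Chars.startswith_iff] at h hc
  rcases List.prefix_or_prefix_of_prefix h hc with hp | hp
  · have := hp.getElem (i := 1) (by decide)
    simp at this
  · have := hp.getElem (i := 1) (by decide)
    simp at this

-- inside a macro, A's loop consumes exactly the block pvCollectBody delimits,
-- appending its body lines to the current macro's mdt entry
theorem pvInside (lines : List String) (mnt : PySem.Dict String Int)
    (mdt ala : PySem.Dict String (List String)) (nm : String) :
    pvProj (lines.foldl pvStepA (mnt, mdt, ala, some nm, true)) =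
      pvProj ((pvCollectBody lines).2.foldl pvStepA
        (mnt, (pvCollectBody lines).1.foldl (fun d l => d.modify nm [] (· ++ [l])) mdt, ala,
         some nm, false)) := by
  induction lines generalizing mdt with
  | nil => simp [pvCollectBody, pvProj]
  | cons l ls ih =>
    by_cases hmac : PySem.Str.startswith l "MACRO" = true
    · have hmend := pvNotBoth l hmac
      simp only [pvCollectBody, hmend, hmac, Bool.false_eq_true, if_neg, if_pos,
        not_false_iff, List.foldl_cons, List.foldl_nil]
      have : pvStepA (mnt, mdt, ala, some nm, true) l
           = pvStepA (mnt, mdt, ala, some nm, false) l := by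
        simp only [pvStepA, hmac, if_pos]
      rw [this]
    · by_cases hmend : PySem.Str.startswith l "MEND" = true
      · simp only [pvCollectBody, hmend, if_pos, List.foldl_cons, List.foldl_nil]
        have : pvStepA (mnt, mdt, ala, some nm, true) l = (mnt, mdt, ala, some nm, false) := by
          simp only [pvStepA, hmac, hmend, Bool.false_eq_true, if_neg, if_pos, not_false_iff]
        rw [this]
      · simp only [pvCollectBody, hmend, hmac, Bool.false_eq_true, if_neg, not_false_iff,
          List.foldl_cons]
        have : pvStepA (mnt, mdt, ala, some nm, true) l
             = (mnt, mdt.modify nm [] (· ++ [l]), ala, some nm, true) := by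
          simp only [pvStepA, hmac, hmend, Bool.false_eq_true, if_neg, if_pos, not_false_iff,
            Option.getD_some]
        rw [this]
        exact ih (mdt.modify nm [] (· ++ [l]))

-- outside a macro, A's remaining loop (plus post-pass) computes B's block parse
theorem pvOutside (n : Nat) (lines : List String) (hn : lines.length ≤ n)
    (mnt : PySem.Dict String Int) (mdt ala : PySem.Dict String (List String))
    (mn : Option String) :
    pvPost (lines.foldl pvStepA (mnt, mdt, ala, mn, false)) =
      pvParseB lines (mnt, pvMend mdt, ala) := by
  induction n generalizing lines mnt mdt ala mn with
  | zero =>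
    obtain rfl : lines = [] := List.eq_nil_of_length_eq_zero (Nat.le_zero.mp hn)
    simp [pvParseB, pvPost]
  | succ n ih =>
    cases lines with
    | nil => simp [pvParseB, pvPost]
    | cons l ls =>
      simp only [List.length_cons, Nat.succ_le_succ_iff] at hn
      by_cases hmac : PySem.Str.startswith l "MACRO" = true
      · simp only [List.foldl_cons]
        rw [show pvStepA (mnt, mdt, ala, mn, false) l
            = (mnt.insert (PySem.List.pyGetD (PySem.Str.split₀ l) 1 "")
                 ((PySem.List.slice (PySem.Str.split₀ l) (some 2) none).length : Int),
               mdt.insert (PySem.List.pyGetD (PySem.Str.split₀ l) 1 "") [],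
               ala.insert (PySem.List.pyGetD (PySem.Str.split₀ l) 1 "")
                 (PySem.List.slice (PySem.Str.split₀ l) (some 2) none),
               some (PySem.List.pyGetD (PySem.Str.split₀ l) 1 ""), true) from by
          simp only [pvStepA, hmac, if_pos]]
        have hin := pvInside ls
          (mnt.insert (PySem.List.pyGetD (PySem.Str.split₀ l) 1 "")
            ((PySem.List.slice (PySem.Str.split₀ l) (some 2) none).length : Int))
          (mdt.insert (PySem.List.pyGetD (PySem.Str.split₀ l) 1 "") [])
          (ala.insert (PySem.List.pyGetD (PySem.Str.split₀ l) 1 "")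
            (PySem.List.slice (PySem.Str.split₀ l) (some 2) none))
          (PySem.List.pyGetD (PySem.Str.split₀ l) 1 "")
        have hpost : ∀ s t, pvProj s = pvProj t → pvPost s = pvPost t := by
          intro s t hst
          simp only [pvProj, Prod.mk.injEq] at hst
          simp [pvPost, hst.1, hst.2.1, hst.2.2]
        rw [hpost _ _ hin]
        rw [pvAppendAll ((pvCollectBody ls).1) mdt (PySem.List.pyGetD (PySem.Str.split₀ l) 1 "") []]
        rw [ih (pvCollectBody ls).2 (le_trans (pvCollectBody_rest_le ls) hn)]
        rw [pvMend_insert]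
        simp only [pvParseB, hmac, if_pos, List.nil_append]
      · simp only [List.foldl_cons]
        rw [show pvStepA (mnt, mdt, ala, mn, false) l = (mnt, mdt, ala, mn, false) from by
          simp only [pvStepA, hmac, Bool.false_eq_true, if_neg, not_false_iff]
          split_ifs <;> rfl]
        rw [ih ls hn]
        simp only [pvParseB, hmac, Bool.false_eq_true, if_neg, not_false_iff]

-- ===== VERDICT (by name: the statement is the Claim_ definition above) =====
theorem generate_mnt_mdt_spec : Claim_equal_generate_mnt_mdt := by
  intro alp _ _
  unfold Spec_generate_mnt_mdt generate_mnt_mdt generate_mnt_mdt_alt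
  dsimp only
  have hnd : ((((PySem.Str.split? alp "\n").getD []).foldl pvStepA
      (PySem.Dict.empty, PySem.Dict.empty, PySem.Dict.empty, none, false)).2.1).keys.Nodup := by
    apply pvFoldA_nodup
    simp [PySem.Dict.empty, PySem.Dict.keys]
  rw [pvFinalize _ hnd]
  have hout := pvOutside ((PySem.Str.split? alp "\n").getD []).length
    ((PySem.Str.split? alp "\n").getD []) le_rfl
    PySem.Dict.empty PySem.Dict.empty PySem.Dict.empty none
  have hme : pvMend PySem.Dict.empty = PySem.Dict.empty := rfl
  rw [hme] at hout
  simp only [pvPost] at hout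
  rw [show (((PySem.Str.split? alp "\n").getD []).foldl pvStepA
      (PySem.Dict.empty, PySem.Dict.empty, PySem.Dict.empty, none, false)).1
    = (pvParseB ((PySem.Str.split? alp "\n").getD [])
        (PySem.Dict.empty, PySem.Dict.empty, PySem.Dict.empty)).1 from congrArg Prod.fst hout,
    show pvMend (((PySem.Str.split? alp "\n").getD []).foldl pvStepA
      (PySem.Dict.empty, PySem.Dict.empty, PySem.Dict.empty, none, false)).2.1
    = (pvParseB ((PySem.Str.split? alp "\n").getD [])
        (PySem.Dict.empty, PySem.Dict.empty, PySem.Dict.empty)).2.1 from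
      congrArg (fun u => u.2.1) hout,
    show (((PySem.Str.split? alp "\n").getD []).foldl pvStepA
      (PySem.Dict.empty, PySem.Dict.empty, PySem.Dict.empty, none, false)).2.2.1
    = (pvParseB ((PySem.Str.split? alp "\n").getD [])
        (PySem.Dict.empty, PySem.Dict.empty, PySem.Dict.empty)).2.2 from
      congrArg (fun u => u.2.2) hout]
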